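-- pv_equiv track=rewrite | github.com/PreludeAndFugue/AdventOfCode | 2020/python/day21.py | find_unique_max
-- ===== SOURCE A (Python) =====
-- from collections import Counter, defaultdict
--
-- def find_unique_max(allergen_helper):
--     '''Find the first allergen that has a unique ingredient with the max count.'''
--     for allergen, counts in allergen_helper.items():
--         c = Counter(v for v in counts.values())
--         max_c = max(k for k in c.keys())
--         max_c_count = c[max_c]
--         if max_c_count == 1:
--             ingredient = [k for k, v in counts.items() if v == max_c]
--             assert len(ingredient) == 1
--             return allergen, ingredient[0]
-- ===== SOURCE B (Python) =====
-- def find_unique_max(allergen_helper):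
--     '''Find the first allergen that has a unique ingredient with the max count.'''
--     for allergen, counts in allergen_helper.items():
--         best = None
--         unique = False
--         for k, v in counts.items():
--             if best is None or v > best[1]:
--                 best = (k, v)
--                 unique = True
--             elif v == best[1]:
--                 unique = False
--         if best is not None and unique:
--             return allergen, best[0]
-- ===== Notes on version B (the rewrite author's own statement) =====
-- stated objective: simpler
-- what changed: Replaces the per-allergen histogram pipeline (Counter over values, max over its keys, count lookup, then a filter pass plus assert) with one single pass per allergen that tracks the running (ingredient, max-count) pair and a uniqueness flag.
import Mathlib
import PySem

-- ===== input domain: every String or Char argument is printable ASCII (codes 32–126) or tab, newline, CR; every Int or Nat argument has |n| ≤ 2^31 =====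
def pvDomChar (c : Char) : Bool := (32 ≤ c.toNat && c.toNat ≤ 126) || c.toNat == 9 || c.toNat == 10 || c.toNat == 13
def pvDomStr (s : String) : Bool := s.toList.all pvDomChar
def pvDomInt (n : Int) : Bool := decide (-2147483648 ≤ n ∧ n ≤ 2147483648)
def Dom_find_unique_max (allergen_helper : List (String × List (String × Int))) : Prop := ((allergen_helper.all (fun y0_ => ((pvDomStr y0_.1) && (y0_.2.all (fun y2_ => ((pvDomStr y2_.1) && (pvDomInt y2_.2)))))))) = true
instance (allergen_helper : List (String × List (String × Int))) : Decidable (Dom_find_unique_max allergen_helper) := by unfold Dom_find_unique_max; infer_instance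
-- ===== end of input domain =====

-- B replaces A's per-allergen Counter/max/filter pipeline by a single pass tracking the running
-- (ingredient, max count) and a uniqueness flag; objective: simpler (no auxiliary histogram).

-- ===== PORT A =====
def find_unique_max : List (String × List (String × Int)) → Option (String × String)
  | [] => none
  | (allergen, counts) :: rest =>
    let c := PySem.Dict.counter (counts.map Prod.snd)
    match PySem.List.max? c.keys (fun x => x) with
    | none => none   -- Python: 'max() arg is an empty sequence' (ValueError); excluded by Pre_
    | some max_c =>
      let max_c_count := c.getD max_c 0
      if max_c_count = 1 then
        some (allergen, ((counts.filter (fun p => p.2 = max_c)).map Prod.fst).headD "")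
      else find_unique_max rest

-- ===== PORT B =====
-- the inner 'for k, v in counts.items()' loop body of Source B
def fumBest (st : Option (String × Int) × Bool) (p : String × Int) : Option (String × Int) × Bool :=
  match st with
  | (none, _) => (some p, true)
  | (some b, u) =>
    if p.2 > b.2 then (some p, true)
    else if p.2 = b.2 then (some b, false)
    else (some b, u)

def find_unique_max_alt : List (String × List (String × Int)) → Option (String × String)
  | [] => none
  | (allergen, counts) :: rest =>
    match counts.foldl fumBest (none, false) with
    | (some b, true) => some (allergen, b.1)
    | _ => find_unique_max_alt rest

-- ===== PRECONDITION & SPEC =====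
-- running max of a dict's values, seeded with the first value (helper for Pre_'s success test and the proofs)
def fumMx (bv : Int) : List (String × Int) → Int
  | [] => bv
  | p :: t => if p.2 > bv then fumMx p.2 t else fumMx bv t

-- 'counts is nonempty and exactly one ingredient attains the maximal count' (A's per-allergen success test)
def fumSuccB (counts : List (String × Int)) : Bool :=
  match counts with
  | [] => false
  | p :: t => ((p :: t).map Prod.snd).count (fumMx p.2 t) == 1

-- Pre_ excludes exactly the inputs on which A raises ValueError: those in which some allergen with an
-- empty counts dict occurs before any allergen with a unique maximal ingredient count.
def Pre_find_unique_max (allergen_helper : List (String × List (String × Int))) : Prop :=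
  ∀ i < allergen_helper.length, (allergen_helper.getD i ("", [])).2 = [] →
    ∃ j < i, fumSuccB ((allergen_helper.getD j ("", [])).2) = true

instance (allergen_helper : List (String × List (String × Int))) : Decidable (Pre_find_unique_max allergen_helper) := by unfold Pre_find_unique_max; infer_instance

def pvWitness_find_unique_max : (List (String × List (String × Int))) :=
  [("dairy", [("a", 2), ("b", 1)]), ("fish", [("c", 1), ("d", 1)])]

def Spec_find_unique_max (allergen_helper : List (String × List (String × Int))) (out : Option (String × String)) : Prop := out = find_unique_max_alt allergen_helper
instance (allergen_helper : List (String × List (String × Int))) (out : Option (String × String)) : Decidable (Spec_find_unique_max allergen_helper out) := by unfold Spec_find_unique_max; infer_instance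

-- ===== CLAIM (what is proved, stated in full; the proofs are below) =====
def Claim_equal_find_unique_max : Prop := ∀ (allergen_helper : List (String × List (String × Int))), Dom_find_unique_max allergen_helper → Pre_find_unique_max allergen_helper → Spec_find_unique_max allergen_helper (find_unique_max allergen_helper)


-- ===== LEMMAS AND PROOFS =====

-- key of the first element achieving the running max
def fumFK (bk : String) (bv : Int) : List (String × Int) → String
  | [] => bk
  | p :: t => if p.2 > bv then fumFK p.1 p.2 t else fumFK bk bv t

-- uniqueness flag
def fumU (bv : Int) (u : Bool) : List (String × Int) → Bool
  | [] => u
  | p :: t => if p.2 > bv then fumU p.2 true t else if p.2 = bv then fumU bv false t else fumU bv u t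

theorem fum_fold_char (l : List (String × Int)) : ∀ (bk : String) (bv : Int) (u : Bool),
    l.foldl fumBest (some (bk, bv), u) = (some (fumFK bk bv l, fumMx bv l), fumU bv u l) := by
  induction l with
  | nil => intro bk bv u; simp [fumFK, fumMx, fumU]
  | cons p t ih =>
    intro bk bv u
    simp only [List.foldl_cons, fumBest, fumFK, fumMx, fumU]
    by_cases h1 : p.2 > bv
    · simp [h1, ih]
    · by_cases h2 : p.2 = bv
      · simp [h1, h2, ih]
      · simp [h1, h2, ih]

theorem fumMx_ge (l : List (String × Int)) : ∀ bv : Int, bv ≤ fumMx bv l := by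
  induction l with
  | nil => intro bv; simp [fumMx]
  | cons p t ih =>
    intro bv
    simp only [fumMx]
    split
    · exact le_trans (by omega) (ih p.2)
    · exact ih bv

theorem fumMx_ub (l : List (String × Int)) : ∀ (bv : Int), ∀ x ∈ l.map Prod.snd, x ≤ fumMx bv l := by
  induction l with
  | nil => intro bv x hx; simp at hx
  | cons p t ih =>
    intro bv x hx
    simp only [List.map_cons, List.mem_cons] at hx
    simp only [fumMx]
    split
    · rcases hx with h | h
      · exact h ▸ fumMx_ge t p.2
      · exact ih p.2 x h
    · rcases hx with h | h
      · exact le_trans (by omega) (fumMx_ge t bv)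
      · exact ih bv x h

theorem fumMx_mem (l : List (String × Int)) : ∀ bv : Int, fumMx bv l = bv ∨ fumMx bv l ∈ l.map Prod.snd := by
  induction l with
  | nil => intro bv; left; rfl
  | cons p t ih =>
    intro bv
    simp only [fumMx, List.map_cons, List.mem_cons]
    split
    · rcases ih p.2 with h | h
      · right; left; exact h
      · right; right; exact h
    · rcases ih bv with h | h
      · left; exact h
      · right; right; exact h

theorem fumU_char (l : List (String × Int)) : ∀ (bv : Int) (u : Bool),
    fumU bv u l = (if bv < fumMx bv l then ((l.map Prod.snd).count (fumMx bv l) == 1)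
                   else (u && ((l.map Prod.snd).count bv == 0))) := by
  induction l with
  | nil => intro bv u; simp [fumU, fumMx]
  | cons p t ih =>
    intro bv u
    have hge1 : p.2 ≤ fumMx p.2 t := fumMx_ge t p.2
    have hge2 : bv ≤ fumMx bv t := fumMx_ge t bv
    simp only [fumU, fumMx, List.map_cons, List.count_cons]
    by_cases h1 : p.2 > bv
    · simp only [if_pos h1]
      rw [ih p.2 true, if_pos (show bv < fumMx p.2 t by omega)]
      by_cases h2 : p.2 < fumMx p.2 t
      · have hne : ¬ (fumMx p.2 t = p.2) := by omega
        rw [if_pos h2]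
        rw [Bool.eq_iff_iff]
        simp only [Bool.true_and, beq_iff_eq]
        split <;> omega
      · have he : fumMx p.2 t = p.2 := by omega
        rw [if_neg h2, he, Bool.eq_iff_iff]
        simp only [Bool.and_eq_true, beq_iff_eq]
        simp only [if_true, true_and]
        omega
    · by_cases h2 : p.2 = bv
      · simp only [if_neg h1, if_pos h2]
        rw [ih bv false]
        by_cases h3 : bv < fumMx bv t
        · have hne : ¬ (fumMx bv t = p.2) := by omega
          rw [if_pos h3, if_pos h3]
          rw [Bool.eq_iff_iff]
          simp only [Bool.true_and, beq_iff_eq]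
          split <;> omega
        · rw [if_neg h3, if_neg h3, h2]
          cases u <;> simp
      · simp only [if_neg h1, if_neg h2]
        rw [ih bv u]
        by_cases h3 : bv < fumMx bv t
        · have hne : ¬ (fumMx bv t = p.2) := by omega
          rw [if_pos h3, if_pos h3]
          rw [Bool.eq_iff_iff]
          simp only [Bool.true_and, beq_iff_eq]
          split <;> omega
        · rw [if_neg h3, if_neg h3]
          have hne : ¬ ((p.2 == bv) = true) := by simpa using h2
          simp only [if_neg hne, Nat.add_zero]

theorem fumFK_char (l : List (String × Int)) : ∀ (bk : String) (bv : Int),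
    (bv < fumMx bv l → some (fumFK bk bv l) = ((l.filter (fun p => p.2 = fumMx bv l)).map Prod.fst).head?) ∧
    (¬ bv < fumMx bv l → fumFK bk bv l = bk) := by
  induction l with
  | nil =>
    intro bk bv
    exact ⟨fun h => absurd h (lt_irrefl bv), fun _ => rfl⟩
  | cons p t ih =>
    intro bk bv
    simp only [fumFK, fumMx]
    by_cases h1 : p.2 > bv
    · simp only [if_pos h1]
      have hge : p.2 ≤ fumMx p.2 t := fumMx_ge t p.2
      refine ⟨fun _ => ?_, fun h => absurd (show bv < fumMx p.2 t by omega) h⟩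
      by_cases h2 : p.2 < fumMx p.2 t
      · have hne : ¬ (p.2 = fumMx p.2 t) := by omega
        rw [List.filter_cons_of_neg (by simpa using hne)]
        exact (ih p.1 p.2).1 h2
      · have he : p.2 = fumMx p.2 t := by omega
        rw [List.filter_cons_of_pos (by simpa using he)]
        simp [(ih p.1 p.2).2 h2]
    · simp only [if_neg h1]
      have hge : bv ≤ fumMx bv t := fumMx_ge t bv
      refine ⟨fun h2 => ?_, (ih bk bv).2⟩
      have hne : ¬ (p.2 = fumMx bv t) := by omega
      rw [List.filter_cons_of_neg (by simpa using hne)]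
      exact (ih bk bv).1 h2

-- the numeric maximum A extracts from its Counter's keys equals B's running max
theorem maxc_eq (p : String × Int) (t : List (String × Int)) (m : Int)
    (h : PySem.List.max? (PySem.Dict.counter ((p :: t).map Prod.snd)).keys (fun x => x) = some m) :
    m = fumMx p.2 t := by
  have hk : (PySem.Dict.counter ((p :: t).map Prod.snd)).keys = PySem.Set.ofList ((p :: t).map Prod.snd) :=
    PySem.Dict.keys_counter _
  have hmem : m ∈ (p :: t).map Prod.snd := by
    have hmm := PySem.List.max?_mem h
    rw [hk] at hmm
    simpa [PySem.Set.mem_ofList] using hmm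
  have hub : ∀ y ∈ (p :: t).map Prod.snd, y ≤ m := by
    intro y hy
    have hy' : y ∈ (PySem.Dict.counter ((p :: t).map Prod.snd)).keys := by
      rw [hk]; simpa [PySem.Set.mem_ofList] using hy
    exact PySem.List.max?_isMax h y hy'
  have h1 : m ≤ fumMx p.2 t := by
    rcases List.mem_cons.1 hmem with h' | h'
    · rw [h']; exact fumMx_ge t p.2
    · exact fumMx_ub t p.2 m h'
  have h2 : fumMx p.2 t ≤ m := by
    rcases fumMx_mem t p.2 with h' | h'
    · rw [h']; exact hub p.2 (by simp)
    · exact hub _ (List.mem_cons_of_mem _ h')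
  omega

-- per-allergen step: on a nonempty counts dict, both ports either succeed with the same pair
-- (when fumSuccB holds) or fall through to the rest of the list
theorem head_step (allergen : String) (p : String × Int) (t : List (String × Int))
    (rest : List (String × List (String × Int))) :
    if fumSuccB (p :: t) then
      find_unique_max ((allergen, p :: t) :: rest) = some (allergen, fumFK p.1 p.2 t)
        ∧ find_unique_max_alt ((allergen, p :: t) :: rest) = some (allergen, fumFK p.1 p.2 t)
    else
      find_unique_max ((allergen, p :: t) :: rest) = find_unique_max rest
        ∧ find_unique_max_alt ((allergen, p :: t) :: rest) = find_unique_max_alt rest := by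
  -- evaluate A's head step
  obtain ⟨m, hm⟩ : ∃ m, PySem.List.max? (PySem.Dict.counter ((p :: t).map Prod.snd)).keys (fun x => x) = some m := by
    cases hmm : PySem.List.max? (PySem.Dict.counter ((p :: t).map Prod.snd)).keys (fun x => x) with
    | none =>
      exfalso
      have hk0 : (PySem.Dict.counter ((p :: t).map Prod.snd)).keys = [] :=
        (PySem.List.max?_eq_none_iff _ _).1 hmm
      rw [PySem.Dict.keys_counter] at hk0
      have hp2 : p.2 ∈ (PySem.Set.ofList ((p :: t).map Prod.snd) : List Int) := by
        simp [PySem.Set.mem_ofList]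
      rw [hk0] at hp2
      simp at hp2
    | some m => exact ⟨m, rfl⟩
  have hmx : m = fumMx p.2 t := maxc_eq p t m hm
  have hcount : (PySem.Dict.counter ((p :: t).map Prod.snd)).getD m 0 = (((p :: t).map Prod.snd).count m : Int) :=
    PySem.Dict.getD_counter _ _
  -- evaluate B's head step
  have hfold : (p :: t).foldl fumBest (none, false) = (some (fumFK p.1 p.2 t, fumMx p.2 t), fumU p.2 true t) := by
    rw [List.foldl_cons]
    show List.foldl fumBest (some (p.1, p.2), true) t = _
    exact fum_fold_char t p.1 p.2 true
  have hA : find_unique_max ((allergen, p :: t) :: rest)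
      = (if (((p :: t).map Prod.snd).count m : Int) = 1 then
           some (allergen, (((p :: t).filter (fun q => q.2 = m)).map Prod.fst).headD "")
         else find_unique_max rest) := by
    simp only [find_unique_max, hm, hcount]
  have hB : find_unique_max_alt ((allergen, p :: t) :: rest)
      = (if fumU p.2 true t then some (allergen, fumFK p.1 p.2 t) else find_unique_max_alt rest) := by
    simp only [find_unique_max_alt, hfold]
    cases hU : fumU p.2 true t <;> simp
  subst hmx
  have hS : fumSuccB (p :: t) = (((p :: t).map Prod.snd).count (fumMx p.2 t) == 1) := rfl
  have hge : p.2 ≤ fumMx p.2 t := fumMx_ge t p.2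
  by_cases hlt : p.2 < fumMx p.2 t
  · have hne' : ¬ (p.2 = fumMx p.2 t) := ne_of_lt hlt
    have hcc : ((p :: t).map Prod.snd).count (fumMx p.2 t) = (t.map Prod.snd).count (fumMx p.2 t) := by
      have hne2 : ¬ (fumMx p.2 t = p.2) := fun h => hne' h.symm
      simp [List.count_cons, hne2, hne']
    by_cases hc : (t.map Prod.snd).count (fumMx p.2 t) = 1
    · have hsucc : fumSuccB (p :: t) = true := by rw [hS, hcc]; simp [hc]
      rw [hsucc, if_pos rfl]
      constructor
      · rw [hA, hcc, if_pos (by omega)]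
        congr 2
        have hkey := (fumFK_char t p.1 p.2).1 hlt
        rw [List.filter_cons_of_neg (by simpa using hne')]
        cases hh : ((t.filter (fun q => q.2 = fumMx p.2 t)).map Prod.fst).head? with
        | none => rw [hh] at hkey; simp at hkey
        | some x =>
          rw [hh] at hkey
          have hx : fumFK p.1 p.2 t = x := by simpa using hkey
          rw [hx]
          cases hl : (t.filter (fun q => q.2 = fumMx p.2 t)).map Prod.fst with
          | nil => rw [hl] at hh; simp at hh
          | cons y ys =>
            rw [hl] at hh
            simp at hh
            simp [hh]
      · rw [hB, fumU_char t p.2 true, if_pos hlt, if_pos (by simpa using hc)]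
    · have hfail : fumSuccB (p :: t) = false := by
        rw [hS, hcc]
        simp only [beq_eq_false_iff_ne, ne_eq]
        exact hc
      rw [hfail, if_neg (by simp)]
      constructor
      · rw [hA, hcc, if_neg (by omega)]
      · rw [hB, fumU_char t p.2 true, if_pos hlt, if_neg (by simpa using hc)]
  · have heq : fumMx p.2 t = p.2 := by omega
    have hcc : ((p :: t).map Prod.snd).count (fumMx p.2 t) = (t.map Prod.snd).count p.2 + 1 := by
      simp [heq, List.count_cons]
    by_cases hc : (t.map Prod.snd).count p.2 = 0
    · have hsucc : fumSuccB (p :: t) = true := by rw [hS, hcc]; simp [hc]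
      rw [hsucc, if_pos rfl]
      constructor
      · rw [hA, hcc, if_pos (by omega)]
        congr 2
        rw [heq, List.filter_cons_of_pos (by simp), (fumFK_char t p.1 p.2).2 hlt]
        simp
      · rw [hB, fumU_char t p.2 true, if_neg hlt]
        simp [hc]
    · have hfail : fumSuccB (p :: t) = false := by
        rw [hS, hcc]
        simp only [beq_eq_false_iff_ne, ne_eq]
        omega
      rw [hfail, if_neg (by simp)]
      constructor
      · rw [hA, hcc, if_neg (by omega)]
      · rw [hB, fumU_char t p.2 true, if_neg hlt]
        simp [hc]

theorem fum_main (l : List (String × List (String × Int))) :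
    Pre_find_unique_max l → find_unique_max l = find_unique_max_alt l := by
  induction l with
  | nil => intro _; rfl
  | cons hd tl ih =>
    intro hpre
    obtain ⟨a, counts⟩ := hd
    cases counts with
    | nil =>
      obtain ⟨j, hj, -⟩ := hpre 0 (by simp) (by simp)
      omega
    | cons p t =>
      have hg := head_step a p t tl
      cases hSv : fumSuccB (p :: t) with
      | true =>
        rw [hSv, if_pos rfl] at hg
        rw [hg.1, hg.2]
      | false =>
        rw [hSv, if_neg (by simp)] at hg
        have hpre' : Pre_find_unique_max tl := by
          intro i hi hempty
          obtain ⟨j, hj, hsucc⟩ := hpre (i + 1) (by simpa using Nat.succ_lt_succ hi) (by simpa using hempty)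
          cases j with
          | zero =>
            rw [List.getD_cons_zero] at hsucc
            rw [hSv] at hsucc
            exact absurd hsucc (by simp)
          | succ j' =>
            exact ⟨j', by omega, by simpa using hsucc⟩
        rw [hg.1, hg.2]
        exact ih hpre'

-- ===== VERDICT (by name: the statement is the Claim_ definition above) =====
theorem find_unique_max_spec : Claim_equal_find_unique_max := by
  intro l _ hpre
  exact fum_main l hpre
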